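-- pv_equiv track=rewrite | github.com/pypi-data/pypi-mirror-161 | packages/PyFOL/PyFOL-1.0.1.tar.gz/PyFOL-1.0.1/pyfol/find.py | find
-- ===== SOURCE A (Python) =====
-- def find(masterstr,findstr,start=0,end=-1,case_insensitive=False):
--     findlst = []
--     total = 0
--     if case_insensitive:
--         masterstr = masterstr.lower()
--         findstr = findstr.lower()
--     for i in range(start+1,len(masterstr) if end==-1 else end):
--         if masterstr[i:i+len(findstr)] == findstr:
--             findlst.append(i)
--             total += 1
--     return findlst,total
-- ===== SOURCE B (Python) =====
-- def find(masterstr, findstr, start=0, end=-1, case_insensitive=False):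
--     if case_insensitive:
--         masterstr = masterstr.lower()
--         findstr = findstr.lower()
--     lo = start + 1
--     hi = len(masterstr) if end == -1 else end
--     if not findstr:
--         idxs = list(range(lo, hi))
--         return idxs, len(idxs)
--     idxs = []
--     i = masterstr.find(findstr, lo)
--     while i != -1 and i < hi:
--         idxs.append(i)
--         i = masterstr.find(findstr, i + 1)
--     return idxs, len(idxs)
-- ===== Notes on version B (the rewrite author's own statement) =====
-- stated objective: faster
-- what changed: Replaces A's per-index slice-and-compare scan over range(start+1, end) by a repeated str.find loop that jumps from one occurrence to the next (plus the direct range for an empty needle); Pre_ excludes only the corner start <= -2 with a nonempty needle occurring in the haystack and a nonempty window, where A's negative-index slicing yields accidental wraparound matches while str.find reads a negative start from the end of the string.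
-- outside the precondition, e.g. on find('abab', 'ab', -5, -1, False): A returns ([-4, 0, 2], 3), B returns ([0, 2], 2); on find('abab', 'ab', -2, -1, False): A returns ([0, 2], 2), B returns ([], 0)
import Mathlib
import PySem

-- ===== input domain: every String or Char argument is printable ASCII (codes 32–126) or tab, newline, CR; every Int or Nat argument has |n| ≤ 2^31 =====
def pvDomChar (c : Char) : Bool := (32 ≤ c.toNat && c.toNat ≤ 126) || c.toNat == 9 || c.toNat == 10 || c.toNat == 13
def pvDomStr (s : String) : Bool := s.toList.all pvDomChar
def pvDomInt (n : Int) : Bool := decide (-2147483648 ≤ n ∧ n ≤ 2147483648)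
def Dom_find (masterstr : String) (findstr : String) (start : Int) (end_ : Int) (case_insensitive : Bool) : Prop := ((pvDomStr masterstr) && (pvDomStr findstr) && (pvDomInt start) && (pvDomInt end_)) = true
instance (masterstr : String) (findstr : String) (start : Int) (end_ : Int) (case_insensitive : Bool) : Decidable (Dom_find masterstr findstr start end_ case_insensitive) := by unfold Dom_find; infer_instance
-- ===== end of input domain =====

-- B replaces A's per-index slice-and-compare scan by a repeated str.find jump loop; intended as faster (timing: 158x median at the largest size, though inputs with an empty or tiny scan window cost the same).


-- ===== PORT A =====
def find (masterstr : String) (findstr : String) (start : Int) (end_ : Int) (case_insensitive : Bool) : List Int × Int :=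
  let ms := if case_insensitive then PySem.Str.lower masterstr else masterstr
  let fs := if case_insensitive then PySem.Str.lower findstr else findstr
  (PySem.List.pyRange (start + 1) (if end_ == -1 then PySem.Str.len ms else end_) 1).foldl
    (fun (acc : List Int × Int) i =>
      if PySem.Str.slice ms (some i) (some (i + PySem.Str.len fs)) == fs then
        (acc.1 ++ [i], acc.2 + 1)
      else acc)
    ([], 0)

-- ===== PORT B =====
-- the while loop of Source B; the fuel is an upper bound on the number of iterations
-- (each iteration moves the search position strictly forward, so ≤ len(ms)+2 iterations)
def findAllFrom (ms fs : String) (hi : Int) : Nat → Int → List Int → List Int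
  | 0, _, acc => acc
  | fuel + 1, pos, acc =>
    let i := PySem.Str.findFrom ms fs pos none
    if i ≠ -1 ∧ i < hi then findAllFrom ms fs hi fuel (i + 1) (acc ++ [i]) else acc

def find_alt (masterstr : String) (findstr : String) (start : Int) (end_ : Int) (case_insensitive : Bool) : List Int × Int :=
  let ms := if case_insensitive then PySem.Str.lower masterstr else masterstr
  let fs := if case_insensitive then PySem.Str.lower findstr else findstr
  let lo := start + 1
  let hi := if end_ == -1 then PySem.Str.len ms else end_
  if fs = "" then
    let idxs := PySem.List.pyRange lo hi 1
    (idxs, (idxs.length : Int))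
  else
    let idxs := findAllFrom ms fs hi (ms.toList.length + 2) lo []
    (idxs, (idxs.length : Int))

-- ===== PRECONDITION & SPEC =====
-- Pre_ excludes only the corner where start ≤ -2 meets a nonempty needle that actually occurs in
-- the (case-folded) haystack and a nonempty index window (on such inputs A still returns a value):
-- there range(start+1, …) makes A slice at negative indices, where Python's negative slice bounds
-- produce accidental wraparound matches near the end of the string, while str.find reads a negative
-- start position as counting from the end — an unspecifiable corner, either value is an artefact.
def Pre_find (masterstr : String) (findstr : String) (start : Int) (end_ : Int) (case_insensitive : Bool) : Prop :=
  -1 ≤ start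
  ∨ (end_ ≠ -1 ∧ end_ ≤ start + 1)
  ∨ (if case_insensitive then PySem.Str.lower findstr else findstr) = ""
  ∨ PySem.Str.isIn (if case_insensitive then PySem.Str.lower findstr else findstr)
      (if case_insensitive then PySem.Str.lower masterstr else masterstr) = false
instance (masterstr : String) (findstr : String) (start : Int) (end_ : Int) (case_insensitive : Bool) : Decidable (Pre_find masterstr findstr start end_ case_insensitive) := by unfold Pre_find; infer_instance

def pvWitness_find : String × String × Int × Int × Bool := ("abcab", "ab", 0, -1, false)

def Spec_find (masterstr : String) (findstr : String) (start : Int) (end_ : Int) (case_insensitive : Bool) (out : List Int × Int) : Prop := out = find_alt masterstr findstr start end_ case_insensitive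
instance (masterstr : String) (findstr : String) (start : Int) (end_ : Int) (case_insensitive : Bool) (out : List Int × Int) : Decidable (Spec_find masterstr findstr start end_ case_insensitive out) := by unfold Spec_find; infer_instance

-- ===== CLAIM (what is proved, stated in full; the proofs are below) =====
def Claim_equal_find : Prop := ∀ (masterstr : String) (findstr : String) (start : Int) (end_ : Int) (case_insensitive : Bool), Dom_find masterstr findstr start end_ case_insensitive → Pre_find masterstr findstr start end_ case_insensitive → Spec_find masterstr findstr start end_ case_insensitive (find masterstr findstr start end_ case_insensitive)

-- ===== LEMMAS AND PROOFS =====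

-- A's accumulate-loop is a filter together with its length.
theorem foldA_filter (p : Int → Bool) (l : List Int) (acc : List Int) (c : Int) :
    l.foldl (fun (a : List Int × Int) i => if p i then (a.1 ++ [i], a.2 + 1) else a) (acc, c)
      = (acc ++ l.filter p, c + (l.filter p).length) := by
  induction l generalizing acc c with
  | nil => simp
  | cons x xs ih =>
    by_cases h : p x <;> simp [h, ih] <;> omega

theorem filter_pyRange_nil (p : Int → Bool) (a b : Int)
    (h : ∀ i : Int, a ≤ i → i < b → ¬ p i = true) :
    (PySem.List.pyRange a b).filter p = [] := by
  rw [List.filter_eq_nil_iff]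
  intro x hx
  rw [PySem.List.mem_pyRange_one] at hx
  exact h x hx.1 hx.2

-- Python quirk kept by PySem: find with a start position past len(s) returns -1.
theorem findFrom_past (ms fs : String) (pos : Int) (h0 : 0 ≤ pos)
    (h : (ms.toList.length : Int) < pos) : PySem.Str.findFrom ms fs pos none = -1 := by
  rw [PySem.Str.findFrom_eq]
  simp only [PySem.Chars.findFrom]
  split_ifs <;> omega

-- a nonempty needle has no match at or past the end of the string
theorem no_match_past (msl fsl : List Char) (hfs : fsl ≠ []) (i : Int)
    (hi : (msl.length : Int) ≤ i) : ¬ fsl <+: msl.drop i.toNat := by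
  intro hpre
  rw [List.drop_eq_nil_of_le (by omega)] at hpre
  exact hfs (List.prefix_nil.mp hpre)

-- the while loop of Source B collects exactly the match positions in [pos, hi), in order
theorem loop_filter (ms fs : String) (hi : Int) (hfs : fs.toList ≠ []) :
    ∀ (fuel : Nat) (pos : Int) (acc : List Int), 0 ≤ pos →
      ms.toList.length + 1 ≤ fuel + pos.toNat →
      findAllFrom ms fs hi fuel pos acc
        = acc ++ (PySem.List.pyRange pos hi).filter
            (fun i => decide (fs.toList <+: ms.toList.drop i.toNat)) := by
  intro fuel
  induction fuel with
  | zero =>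
    intro pos acc h0 hfuel
    rw [findAllFrom, filter_pyRange_nil]
    · simp
    · intro i hpi _
      simp only [decide_eq_true_eq]
      exact no_match_past ms.toList fs.toList hfs i (by omega)
  | succ fuel ih =>
    intro pos acc h0 hfuel
    rw [findAllFrom]
    by_cases hpos : pos ≤ (ms.toList.length : Int)
    · -- position inside the string: use the findFrom characterisation
      have hcast : ((pos.toNat : Nat) : Int) = pos := Int.toNat_of_nonneg h0
      have hk : pos.toNat ≤ ms.toList.length := by omega
      by_cases hj : PySem.Str.findFrom ms fs pos none = -1
      · -- no further occurrence: the loop stops and the filter is empty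
        rw [if_neg (fun h => h.1 hj)]
        rw [filter_pyRange_nil]
        · simp
        · intro i hpi _
          simp only [decide_eq_true_eq]
          intro hpre
          have hnone : ¬ fs.toList <:+: ms.toList.drop pos.toNat := by
            rw [PySem.Str.findFrom_eq, ← hcast] at hj
            exact (PySem.Chars.findFrom_natCast_eq_neg_one_iff ms.toList fs.toList pos.toNat hk).mp hj
          apply hnone
          rw [← PySem.Chars.isIn_iff_infix, ← PySem.Chars.exists_prefix_drop_iff_isIn]
          refine ⟨i.toNat - pos.toNat, ?_⟩
          rw [List.drop_drop]
          have heq : pos.toNat + (i.toNat - pos.toNat) = i.toNat := by omega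
          rw [heq]; exact hpre
      · -- an occurrence j exists
        have hspec := PySem.Chars.findFrom_natCast_spec ms.toList fs.toList pos.toNat hk
          (by rw [hcast, ← PySem.Str.findFrom_eq]; exact hj)
        rw [hcast, ← PySem.Str.findFrom_eq] at hspec
        obtain ⟨hle, hmatch, hmin⟩ := hspec
        set j := PySem.Str.findFrom ms fs pos none with hjdef
        have hj0 : 0 ≤ j := le_trans (by omega) hle
        by_cases hlt : j < hi
        · -- take the branch, consume the occurrence, recurse from j+1
          rw [if_pos ⟨hj, hlt⟩]
          have hmlen : fs.toList.length ≤ (ms.toList.drop j.toNat).length :=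
            List.IsPrefix.length_le hmatch
          have hjlen : (j : Int) ≤ ms.toList.length := by
            simp only [List.length_drop] at hmlen
            have : 0 < fs.toList.length := List.length_pos_iff.mpr hfs
            omega
          rw [ih (j + 1) (acc ++ [j]) (by omega) (by omega)]
          rw [PySem.List.pyRange_one_append pos (j + 1) hi (by omega) (by omega)]
          rw [List.filter_append]
          have hsplit : PySem.List.pyRange pos (j + 1) = PySem.List.pyRange pos j ++ [j] :=
            PySem.List.pyRange_one_succ_right (by omega)
          rw [hsplit, List.filter_append]
          rw [filter_pyRange_nil _ pos j ?_]
          · simp only [List.filter_cons, List.filter_nil]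
            rw [if_pos (by simp only [decide_eq_true_eq]; exact hmatch)]
            simp
          · intro i hpi hij
            simp only [decide_eq_true_eq]
            exact hmin i.toNat (by omega) (by omega)
        · -- next occurrence is beyond hi: the loop stops, nothing in [pos, hi) matches
          rw [if_neg (fun h => hlt h.2)]
          rw [filter_pyRange_nil]
          · simp
          · intro i hpi hihi
            simp only [decide_eq_true_eq]
            exact hmin i.toNat (by omega) (by omega)
    · -- position past the end: find returns -1 and the filter is empty
      rw [if_neg (fun h => h.1 (findFrom_past ms fs pos h0 (by omega)))]
      rw [filter_pyRange_nil]
      · simp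
      · intro i hpi _
        simp only [decide_eq_true_eq]
        exact no_match_past ms.toList fs.toList hfs i (by omega)

-- A's per-index test, at a nonnegative index, is "the needle is a prefix of the tail there"
theorem testA_eq (ms fs : String) (i : Int) (h0 : 0 ≤ i) :
    (PySem.Str.slice ms (some i) (some (i + PySem.Str.len fs)) == fs)
      = decide (fs.toList <+: ms.toList.drop i.toNat) := by
  rw [Bool.eq_iff_iff]
  simp only [beq_iff_eq, decide_eq_true_eq]
  rw [← String.toList_inj, PySem.Str.toList_slice, PySem.Chars.slice_eq_listSlice]
  rw [PySem.Str.len_eq]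
  rw [PySem.List.slice_toNat ms.toList h0 (by omega)]
  have harith : (i + (fs.toList.length : Int)).toNat - i.toNat = fs.toList.length := by omega
  rw [harith]
  rw [List.prefix_iff_eq_take]
  exact eq_comm

-- A's per-index test always succeeds for the empty needle
theorem testA_empty (ms : String) (fs : String) (hfs : fs = "") (i : Int) :
    (PySem.Str.slice ms (some i) (some (i + PySem.Str.len fs)) == fs) = true := by
  subst hfs
  simp only [beq_iff_eq]
  rw [← String.toList_inj, PySem.Str.toList_slice, PySem.Chars.slice_eq_listSlice]
  have h0 : (PySem.List.slice ms.toList (some (i + PySem.Str.len "")) (some (i + PySem.Str.len ""))).length = 0 := by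
    rw [PySem.List.length_slice]; omega
  have : PySem.Str.len "" = 0 := by rw [PySem.Str.len_eq]; simp
  rw [this] at h0 ⊢
  simp only [add_zero] at h0 ⊢
  -- abbreviate: a slice with equal bounds is empty
  rw [show PySem.List.slice ms.toList (some i) (some i) = [] from
        List.eq_nil_of_length_eq_zero (by rw [PySem.List.length_slice]; omega)]
  simp

-- the two ports agree for any lowered pair of strings and any 0 ≤ lo
theorem core (ms fs : String) (lo hi : Int) (h0 : 0 ≤ lo) :
    (PySem.List.pyRange lo hi).foldl
        (fun (acc : List Int × Int) i =>
          if PySem.Str.slice ms (some i) (some (i + PySem.Str.len fs)) == fs then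
            (acc.1 ++ [i], acc.2 + 1)
          else acc) ([], 0)
      = if fs = "" then
          (PySem.List.pyRange lo hi, ((PySem.List.pyRange lo hi).length : Int))
        else
          (findAllFrom ms fs hi (ms.toList.length + 2) lo [],
           ((findAllFrom ms fs hi (ms.toList.length + 2) lo []).length : Int)) := by
  rw [foldA_filter]
  by_cases hfs : fs = ""
  · rw [if_pos hfs]
    have hall : (PySem.List.pyRange lo hi).filter
        (fun i => PySem.Str.slice ms (some i) (some (i + PySem.Str.len fs)) == fs)
        = PySem.List.pyRange lo hi := by
      rw [List.filter_eq_self]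
      intro i _
      exact testA_empty ms fs hfs i
    rw [hall]
    simp
  · rw [if_neg hfs]
    have hfs' : fs.toList ≠ [] := by
      intro h
      exact hfs (String.toList_inj.mp (by simp [h]))
    have hcongr : (PySem.List.pyRange lo hi).filter
        (fun i => PySem.Str.slice ms (some i) (some (i + PySem.Str.len fs)) == fs)
        = (PySem.List.pyRange lo hi).filter
            (fun i => decide (fs.toList <+: ms.toList.drop i.toNat)) := by
      apply List.filter_congr
      intro i hmem
      rw [PySem.List.mem_pyRange_one] at hmem
      exact testA_eq ms fs i (by omega)
    rw [hcongr]
    rw [loop_filter ms fs hi hfs' (ms.toList.length + 2) lo [] h0 (by omega)]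
    simp

-- any slice of a list is a contiguous piece of it
theorem slice_infix {α : Type} (xs : List α) (a? b? : Option Int) :
    PySem.List.slice xs a? b? <:+: xs := by
  simp only [PySem.List.slice]
  exact ((List.take_prefix _ _).isInfix).trans (List.drop_suffix _ _).isInfix

-- str.find either fails or returns a nonnegative index of a real occurrence
theorem findFrom_cases (ms fs : String) (pos : Int) :
    PySem.Str.findFrom ms fs pos none = -1 ∨
      (0 ≤ PySem.Str.findFrom ms fs pos none ∧ fs.toList <:+: ms.toList) := by
  rw [PySem.Str.findFrom_eq]
  simp only [PySem.Chars.findFrom]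
  split_ifs
  all_goals first
    | (left; rfl)
    | (rename_i hne
       have hinf := (PySem.Chars.find_ne_neg_one_iff _ _).mp hne
       have hpos := (PySem.Chars.find_nonneg_iff _ _).mpr hinf
       exact Or.inr ⟨by omega,
         hinf.trans (((List.drop_suffix _ _).isInfix).trans (List.take_prefix _ _).isInfix)⟩)

-- the ports agree on every input Pre_ admits (stated over the already case-folded strings)
theorem core2 (ms fs : String) (start end_ : Int)
    (hpre : -1 ≤ start ∨ (end_ ≠ -1 ∧ end_ ≤ start + 1) ∨ fs = "" ∨ PySem.Str.isIn fs ms = false) :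
    (PySem.List.pyRange (start + 1) (if end_ == -1 then PySem.Str.len ms else end_)).foldl
        (fun (acc : List Int × Int) i =>
          if PySem.Str.slice ms (some i) (some (i + PySem.Str.len fs)) == fs then
            (acc.1 ++ [i], acc.2 + 1)
          else acc) ([], 0)
      = if fs = "" then
          (PySem.List.pyRange (start + 1) (if end_ == -1 then PySem.Str.len ms else end_),
           ((PySem.List.pyRange (start + 1) (if end_ == -1 then PySem.Str.len ms else end_)).length : Int))
        else
          (findAllFrom ms fs (if end_ == -1 then PySem.Str.len ms else end_) (ms.toList.length + 2) (start + 1) [],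
           ((findAllFrom ms fs (if end_ == -1 then PySem.Str.len ms else end_) (ms.toList.length + 2) (start + 1) []).length : Int)) := by
  set hi := (if end_ == -1 then PySem.Str.len ms else end_) with hhi
  by_cases h0 : 0 ≤ start + 1
  · exact core ms fs (start + 1) hi h0
  · by_cases hfs : fs = ""
    · -- empty needle: every per-index test succeeds, both sides are the whole range
      rw [foldA_filter, if_pos hfs]
      rw [List.filter_eq_self.mpr (fun i _ => testA_empty ms fs hfs i)]
      simp
    · rw [if_neg hfs]
      rcases hpre with h | ⟨hne, hle⟩ | h | hnotin
      · omega
      · -- empty index window: A's range is empty and B's loop stops at once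
        have hhe : hi = end_ := by rw [hhi, if_neg (by simpa using hne)]
        rw [PySem.List.pyRange_one_eq_nil (by omega)]
        simp only [List.foldl_nil]
        have hloop : findAllFrom ms fs hi (ms.toList.length + 2) (start + 1) [] = [] := by
          show findAllFrom ms fs hi (ms.toList.length + 1 + 1) (start + 1) [] = []
          rw [findAllFrom]
          rcases findFrom_cases ms fs (start + 1) with hm | ⟨hge, _⟩
          · rw [if_neg (fun hc => hc.1 hm)]
          · rw [if_neg (fun hc => absurd hc.2 (by omega))]
        rw [hloop]
        simp
      · exact absurd h hfs
      · -- the needle occurs nowhere: A's filter is empty and B's loop stops at once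
        rw [foldA_filter]
        have hnil : (PySem.List.pyRange (start + 1) hi).filter
            (fun i => PySem.Str.slice ms (some i) (some (i + PySem.Str.len fs)) == fs) = [] := by
          rw [List.filter_eq_nil_iff]
          intro i _
          simp only [beq_iff_eq]
          intro hslice
          have hinf : fs.toList <:+: ms.toList := by
            rw [← hslice, PySem.Str.toList_slice, PySem.Chars.slice_eq_listSlice]
            exact slice_infix ms.toList _ _
          rw [← PySem.Str.isIn_iff_infix] at hinf
          rw [hnotin] at hinf
          exact Bool.false_ne_true hinf
        rw [hnil]
        have hloop : findAllFrom ms fs hi (ms.toList.length + 2) (start + 1) [] = [] := by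
          show findAllFrom ms fs hi (ms.toList.length + 1 + 1) (start + 1) [] = []
          rw [findAllFrom]
          rcases findFrom_cases ms fs (start + 1) with hm | ⟨hge, hinf⟩
          · rw [if_neg (fun hc => hc.1 hm)]
          · rw [← PySem.Str.isIn_iff_infix, hnotin] at hinf
            exact absurd hinf Bool.false_ne_true
        rw [hloop]
        simp

-- ===== VERDICT (by name: the statement is the Claim_ definition above) =====
theorem find_spec : Claim_equal_find := by
  intro masterstr findstr start end_ case_insensitive _ hpre
  unfold Pre_find at hpre
  show find masterstr findstr start end_ case_insensitive
      = find_alt masterstr findstr start end_ case_insensitive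
  unfold find find_alt
  exact core2 _ _ start end_ hpre
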